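-- pv_equiv track=rewrite | github.com/Gonzalo-Ortega/URJC-Algorithm-Design-and-Analysis-Course | Exercices/4. Backtracking/Discord.py | coloring_count
-- ===== SOURCE A (Python) =====
-- def is_feasible(graph, case, node, color):
--     for adj in graph[node]:
--         if adj < node:
--             if color == case[adj]:
--                 return False
--     return True
--
-- def coloring_count(graph, solution, node, color_amount):
--     if node == len(graph):
--         success = True
--     else:
--         success = False
--         color = 1
--         while not success and color <= color_amount:
--             if is_feasible(graph, solution, node, color):
--                 solution[node] = color
--                 case, success = coloring_count(graph, solution, node + 1, color_amount)
--             if not success: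
--                 solution[node] = 0
--             color += 1
--     return solution, success
-- ===== SOURCE B (Python) =====
-- def is_feasible(graph, case, node, color):
--     for adj in graph[node]:
--         if adj < node:
--             if color == case[adj]:
--                 return False
--     return True
--
-- def coloring_count(graph, solution, node, color_amount):
--     n = len(graph)
--     if node == n:
--         return solution, True
--     if color_amount < 1:
--         return solution, False
--     next_color = [1] * n
--     i = node
--     while True:
--         c = next_color[i]
--         while c <= color_amount and not is_feasible(graph, solution, i, c):
--             c += 1
--         if c > color_amount:
--             solution[i] = 0
--             i -= 1
--             if i < node:
--                 return solution, False
--         else: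
--             solution[i] = c
--             next_color[i] = c + 1
--             i += 1
--             if i == n:
--                 return solution, True
--             next_color[i] = 1
-- ===== Notes on version B (the rewrite author's own statement) =====
-- stated objective: alternative
-- what changed: Replaces A's node-by-node recursion (with an inner while over colors interleaved with recursive calls) by an explicit iterative backtracking loop over an index cursor with a per-node next-color array: scan colors forward, advance on success, zero the node and step back on exhaustion. Pre_ excludes negative node and negative backward adjacency entries (A's whole-array wraparound indexing there is accidental; B's cursor walk addresses nodes directly) and inputs where A raises IndexError (node > len(graph), solution shorter than graph).
-- outside the precondition, e.g. on coloring_count([[], [0, -1]], [0, 2], 0, 2): A returns ([1, 2], True), B returns ([2, 1], True); on coloring_count([[0, -1]], [1], -1, 1): A returns ([0], False), B does not finish within the time limit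
import Mathlib
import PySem

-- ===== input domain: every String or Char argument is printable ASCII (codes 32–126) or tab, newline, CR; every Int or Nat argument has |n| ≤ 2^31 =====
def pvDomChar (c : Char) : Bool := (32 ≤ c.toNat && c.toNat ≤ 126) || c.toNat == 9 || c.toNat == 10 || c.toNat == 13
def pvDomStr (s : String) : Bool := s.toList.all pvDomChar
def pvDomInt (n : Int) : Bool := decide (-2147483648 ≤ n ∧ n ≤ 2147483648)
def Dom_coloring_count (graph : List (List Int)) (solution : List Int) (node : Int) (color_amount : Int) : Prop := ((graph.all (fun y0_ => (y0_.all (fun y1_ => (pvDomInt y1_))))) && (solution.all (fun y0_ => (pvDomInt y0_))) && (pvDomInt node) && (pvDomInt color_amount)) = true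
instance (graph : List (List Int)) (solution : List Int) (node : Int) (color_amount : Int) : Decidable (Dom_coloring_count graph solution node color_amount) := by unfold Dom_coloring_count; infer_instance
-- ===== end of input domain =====

-- B replaces A's node-by-node recursion by an explicit iterative backtracking loop with a
-- per-node next-color array (objective: alternative decomposition, same cost).  Both Pythons
-- mutate `solution` in place and leave the same final list content; the equivalence proved
-- here is about the returned pair.

-- ===== PORT A =====
-- is_feasible (shared helper: Source B defines the identical function)
def isFeasible (graph : List (List Int)) (case_ : List Int) (node color : Int) : Bool :=
  ((PySem.List.pyGet? graph node).getD []).all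
    (fun adj => !(decide (adj < node) && decide (color = PySem.List.pyGetD case_ adj (color + 1))))

-- the while loop of A: fuel cf is a totality guard; it reaches 0 only once color > color_amount,
-- where the loop would exit with (sol, false) anyway
def ccLoop (graph : List (List Int)) (amount node : Int)
    (rec : List Int → List Int × Bool) : Nat → Int → List Int → List Int × Bool
  | 0, _, sol => (sol, false)
  | cf + 1, color, sol =>
    if color ≤ amount then
      let p :=
        if isFeasible graph sol node color then rec (PySem.List.pySetD sol node color)
        else (sol, false)
      if p.2 then (p.1, true)
      else ccLoop graph amount node rec cf (color + 1) (PySem.List.pySetD p.1 node 0)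
    else (sol, false)

-- A's recursion over node; fuel decreases by one per recursive call (totality guard)
def ccAux (graph : List (List Int)) (amount : Int) : Nat → List Int → Int → List Int × Bool
  | 0, sol, _ => (sol, false)
  | f + 1, sol, node =>
    if node = (graph.length : Int) then (sol, true)
    else ccLoop graph amount node (fun s => ccAux graph amount f s (node + 1)) amount.toNat 1 sol

def coloring_count (graph : List (List Int)) (solution : List Int) (node : Int)
    (color_amount : Int) : List Int × Bool :=
  ccAux graph color_amount ((graph.length - node.toNat) + 1) solution node

-- ===== PORT B =====
-- the inner while of Source B: scan for the first feasible color ≥ c; fuel is a totality guard,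
-- it reaches 0 only once c > color_amount, where the while guard is false anyway
def bScan (graph : List (List Int)) (sol : List Int) (i amount : Int) : Nat → Int → Int
  | 0, c => c
  | f + 1, c =>
    if c ≤ amount && !isFeasible graph sol i c then bScan graph sol i amount f (c + 1) else c

-- fuel bound for the outer loop (totality guard only): twice the weighted sum of colors
-- still available at each node, plus one
def phiSum (amount : Int) : List Int → Nat
  | [] => 0
  | c :: cs => (amount + 1 - c).toNat * (amount.toNat + 1) ^ cs.length + phiSum amount cs

-- the outer `while True` of Source B over the cursor i and the next_color array
def bLoop (graph : List (List Int)) (node amount : Int) :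
    Nat → Int → List Int → List Int → List Int × Bool
  | 0, _, _, sol => (sol, false)
  | f + 1, i, next, sol =>
    let c0 := PySem.List.pyGetD next i 1
    let c := bScan graph sol i amount (amount + 1 - c0).toNat c0
    if amount < c then
      let sol' := PySem.List.pySetD sol i 0
      if i - 1 < node then (sol', false)
      else bLoop graph node amount f (i - 1) next sol'
    else
      let sol' := PySem.List.pySetD sol i c
      let next' := PySem.List.pySetD next i (c + 1)
      if i + 1 = (graph.length : Int) then (sol', true)
      else bLoop graph node amount f (i + 1) (PySem.List.pySetD next' (i + 1) 1) sol'

def coloring_count_alt (graph : List (List Int)) (solution : List Int) (node : Int)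
    (color_amount : Int) : List Int × Bool :=
  if node = (graph.length : Int) then (solution, true)
  else if color_amount < 1 then (solution, false)
  else bLoop graph node color_amount
        (2 * phiSum color_amount (List.replicate (graph.length - node.toNat) 1) + 1)
        node (List.replicate graph.length 1) solution

-- ===== PRECONDITION & SPEC =====
-- adjacency rows at or above the start node may only point backwards to nonnegative nodes
def adjOK (graph : List (List Int)) (node : Int) : Prop :=
  ∀ p ∈ graph.zipIdx, node ≤ (p.2 : Int) → ∀ adj ∈ p.1, adj < (p.2 : Int) → 0 ≤ adj

-- Pre_ excludes, only when the search actually runs (color_amount ≥ 1, node ≠ len(graph)):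
-- negative `node` and negative backward adjacency entries (A then addresses wrapped
-- whole-array positions, an accident of Python's negative indexing; B's cursor walk
-- addresses nodes directly), node > len(graph) and a too-short `solution`
-- (A raises IndexError on most of those).
def Pre_coloring_count (graph : List (List Int)) (solution : List Int) (node : Int)
    (color_amount : Int) : Prop :=
  1 ≤ color_amount →
    (0 ≤ node ∧ node ≤ (graph.length : Int) ∧
      (node < (graph.length : Int) →
        (graph.length ≤ solution.length ∧ adjOK graph node)))

instance (graph : List (List Int)) (solution : List Int) (node : Int) (color_amount : Int) :
    Decidable (Pre_coloring_count graph solution node color_amount) := by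
  unfold Pre_coloring_count adjOK; infer_instance

def pvWitness_coloring_count : List (List Int) × List Int × Int × Int :=
  ([[], [0]], [7, 7], 0, 2)

def Spec_coloring_count (graph : List (List Int)) (solution : List Int) (node : Int)
    (color_amount : Int) (out : List Int × Bool) : Prop :=
  out = coloring_count_alt graph solution node color_amount

instance (graph : List (List Int)) (solution : List Int) (node : Int) (color_amount : Int)
    (out : List Int × Bool) : Decidable (Spec_coloring_count graph solution node color_amount out) := by
  unfold Spec_coloring_count; infer_instance

-- ===== CLAIM (what is proved, stated in full; the proofs are below) =====
def Claim_equal_coloring_count : Prop := ∀ (graph : List (List Int)) (solution : List Int) (node : Int) (color_amount : Int), Dom_coloring_count graph solution node color_amount → Pre_coloring_count graph solution node color_amount → Spec_coloring_count graph solution node color_amount (coloring_count graph solution node color_amount)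

-- ===== LEMMAS AND PROOFS =====

-- A's inner loop at level j, entered at color c, with its exact remaining fuel
def AloopI (G : List (List Int)) (A : Int) (j : Nat) (c : Int) (s : List Int) :
    List Int × Bool :=
  ccLoop G A (j : Int) (fun t => ccAux G A (G.length - j) t ((j : Int) + 1))
    (A + 1 - c).toNat c s

-- unwinding the pending levels node₀ .. node₀+k-1 of A's recursion around a result
def Unw (G : List (List Int)) (A : Int) (node₀ : Nat) (next : List Int) :
    Nat → (List Int × Bool) → List Int × Bool
  | 0, r => r
  | k + 1, r =>
    Unw G A node₀ next k
      (if r.2 then r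
       else AloopI G A (node₀ + k) (next.getD (node₀ + k) 1) (r.1.set (node₀ + k) 0))

lemma adjOK_level (G : List (List Int)) (m : Int) (hadj : adjOK G m) (i : Nat)
    (hi : i < G.length) (hm : m ≤ (i : Int)) :
    ∀ adj ∈ (PySem.List.pyGet? G (i : Int)).getD [], adj < (i : Int) → 0 ≤ adj := by
  intro adj hmem hlt
  have hrow : PySem.List.pyGet? G (i : Int) = some G[i] := by
    rw [PySem.List.pyGet?_natCast, List.getElem?_eq_getElem hi]
  rw [hrow] at hmem
  have hz : (G[i], i) ∈ G.zipIdx := by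
    have h2 : i < G.zipIdx.length := by simp [hi]
    have := List.getElem_mem h2
    simpa using this
  exact hadj (G[i], i) hz hm adj hmem hlt

lemma all_congr_mem {α : Type} (l : List α) (p q : α → Bool) (h : ∀ a ∈ l, p a = q a) :
    l.all p = l.all q := by
  induction l with
  | nil => rfl
  | cons x xs ih =>
    simp only [List.all_cons, h x (by simp), ih (fun a ha => h a (by simp [ha]))]

lemma isFeasible_set_zero (G : List (List Int)) (j : Nat) (s : List Int) (c : Int)
    (hadj : ∀ adj ∈ (PySem.List.pyGet? G (j : Int)).getD [], adj < (j : Int) → 0 ≤ adj) :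
    isFeasible G (s.set j 0) (j : Int) c = isFeasible G s (j : Int) c := by
  unfold isFeasible
  apply all_congr_mem
  intro adj hmem
  by_cases hlt : adj < (j : Int)
  · have hpos : 0 ≤ adj := hadj adj hmem hlt
    have hget : PySem.List.pyGetD (s.set j 0) adj (c + 1) = PySem.List.pyGetD s adj (c + 1) := by
      obtain ⟨m, rfl⟩ : ∃ m : Nat, adj = (m : Int) := ⟨adj.toNat, by omega⟩
      have hne : j ≠ m := by omega
      simp only [PySem.List.pyGetD_natCast]
      simp [List.getD, List.getElem?_set_ne hne]
    rw [hget]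
  · simp [hlt]

lemma bScan_set_zero (G : List (List Int)) (j : Nat) (s : List Int) (A : Int)
    (hadj : ∀ adj ∈ (PySem.List.pyGet? G (j : Int)).getD [], adj < (j : Int) → 0 ≤ adj) :
    ∀ (f : Nat) (c : Int), bScan G (s.set j 0) (j : Int) A f c = bScan G s (j : Int) A f c := by
  intro f
  induction f with
  | zero => intro c; rfl
  | succ f ih =>
    intro c
    simp only [bScan, isFeasible_set_zero G j s c hadj, ih]

lemma bScan_ge (G : List (List Int)) (s : List Int) (i A : Int) :
    ∀ (f : Nat) (c : Int), c ≤ bScan G s i A f c := by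
  intro f
  induction f with
  | zero => intro c; simp [bScan]
  | succ f ih =>
    intro c
    simp only [bScan]
    split
    · exact le_trans (by omega) (ih (c + 1))
    · exact le_refl c

-- characterisation of A's inner loop in terms of B's colour scan
lemma Aloop_eq (G : List (List Int)) (A : Int) (j : Nat)
    (rec : List Int → List Int × Bool)
    (hadj : ∀ adj ∈ (PySem.List.pyGet? G (j : Int)).getD [], adj < (j : Int) → 0 ≤ adj) :
    ∀ (k : Nat) (c₀ : Int) (s : List Int), k = (A + 1 - c₀).toNat →
      ccLoop G A (j : Int) rec k c₀ s
      = (let c := bScan G s (j : Int) A k c₀;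
         if c ≤ A then
           (let p := rec (s.set j c);
            if p.2 then (p.1, true)
            else ccLoop G A (j : Int) rec (A - c).toNat (c + 1) (p.1.set j 0))
         else (if c₀ ≤ A then (s.set j 0, false) else (s, false))) := by
  intro k
  induction k with
  | zero =>
    intro c₀ s hk
    have hgt : ¬ c₀ ≤ A := by omega
    simp [ccLoop, bScan, hgt]
  | succ k ih =>
    intro c₀ s hk
    have hle : c₀ ≤ A := by omega
    by_cases hF : isFeasible G s (j : Int) c₀ = true
    · simp only [ccLoop, bScan, if_pos hle, hF, Bool.not_true, Bool.and_false,
        Bool.false_eq_true, if_false, PySem.List.pySetD_natCast]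
      have hfuel : k = (A - c₀).toNat := by omega
      simp [hfuel]
    · have hF' : isFeasible G s (j : Int) c₀ = false := by
        cases h : isFeasible G s (j : Int) c₀
        · rfl
        · exact absurd h hF
      have hstep : ccLoop G A (j : Int) rec (k + 1) c₀ s
          = ccLoop G A (j : Int) rec k (c₀ + 1) (s.set j 0) := by
        simp [ccLoop, if_pos hle, hF', PySem.List.pySetD_natCast]
      have hscan : bScan G s (j : Int) A (k + 1) c₀ = bScan G s (j : Int) A k (c₀ + 1) := by
        simp [bScan, hle, hF']
      rw [hstep, ih (c₀ + 1) (s.set j 0) (by omega), bScan_set_zero G j s A hadj, hscan]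
      simp only [List.set_set]
      by_cases hc : bScan G s (j : Int) A k (c₀ + 1) ≤ A
      · simp [hc]
      · simp only [if_neg hc]
        split_ifs <;> simp

lemma Aloop_zero (G : List (List Int)) (A : Int) (j : Nat) (c₀ : Int) (s : List Int)
    (hle : c₀ ≤ A)
    (hadj : ∀ adj ∈ (PySem.List.pyGet? G (j : Int)).getD [], adj < (j : Int) → 0 ≤ adj) :
    AloopI G A j c₀ (s.set j 0) = AloopI G A j c₀ s := by
  unfold AloopI
  rw [Aloop_eq G A j _ hadj _ c₀ (s.set j 0) rfl, Aloop_eq G A j _ hadj _ c₀ s rfl,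
    bScan_set_zero G j s A hadj]
  simp only [List.set_set]
  by_cases hc : bScan G s (j : Int) A (A + 1 - c₀).toNat c₀ ≤ A
  · simp [hc]
  · simp [hc, hle]

lemma Unw_true (G : List (List Int)) (A : Int) (node₀ : Nat) (next : List Int) :
    ∀ (k : Nat) (s : List Int), Unw G A node₀ next k (s, true) = (s, true) := by
  intro k
  induction k with
  | zero => intro s; rfl
  | succ k ih => intro s; simp [Unw, ih]

lemma Unw_congr (G : List (List Int)) (A : Int) (node₀ : Nat) (next next' : List Int) :
    ∀ (k : Nat) (r : List Int × Bool),
      (∀ m : Nat, m < k → next.getD (node₀ + m) 1 = next'.getD (node₀ + m) 1) →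
      Unw G A node₀ next k r = Unw G A node₀ next' k r := by
  intro k
  induction k with
  | zero => intro r _; rfl
  | succ k ih =>
    intro r h
    simp only [Unw, h k (by omega)]
    exact ih _ (fun m hm => h m (by omega))

lemma phiSum_set (A : Int) :
    ∀ (cs : List Int) (k : Nat) (v : Int), k < cs.length →
      phiSum A (cs.set k v) + (A + 1 - cs.getD k 0).toNat * (A.toNat + 1) ^ (cs.length - 1 - k)
      = phiSum A cs + (A + 1 - v).toNat * (A.toNat + 1) ^ (cs.length - 1 - k) := by
  intro cs
  induction cs with
  | nil => intro k v h; simp at h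
  | cons c cs ih =>
    intro k v h
    cases k with
    | zero =>
      simp only [List.set_cons_zero, phiSum, List.getD_cons_zero, List.length_cons,
        Nat.add_sub_cancel, Nat.sub_zero]
      omega
    | succ k =>
      have hk : k < cs.length := by simpa using h
      have e1 : (c :: cs).length - 1 - (k + 1) = cs.length - 1 - k := by
        simp; omega
      simp only [List.set_cons_succ, phiSum, List.getD_cons_succ, List.length_set, e1]
      have := ih k v hk
      omega

lemma phi_key (A : Int) (cs : List Int) (k : Nat) (c : Int)
    (hk : k + 1 < cs.length) (hle : cs.getD k 0 ≤ c) (hcA : c ≤ A) :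
    phiSum A ((cs.set k (c + 1)).set (k + 1) 1) + 1 ≤ phiSum A cs := by
  have hk0 : k < cs.length := by omega
  have hL1 : (cs.set k (c + 1)).length = cs.length := by simp
  have e1 := phiSum_set A cs k (c + 1) hk0
  have e2 := phiSum_set A (cs.set k (c + 1)) (k + 1) 1 (by omega)
  rw [hL1] at e2
  set W2 := (A.toNat + 1) ^ (cs.length - 1 - (k + 1)) with hW2def
  have hW1 : (A.toNat + 1) ^ (cs.length - 1 - k) = (A.toNat + 1) * W2 := by
    rw [hW2def, ← pow_succ']
    congr 1
    omega
  have hW2pos : 1 ≤ W2 := Nat.one_le_pow _ _ (by omega)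
  rw [hW1] at e1
  have hxy : (A - c).toNat + 1 ≤ (A + 1 - cs.getD k 0).toNat := by omega
  have hmul : ((A - c).toNat + 1) * ((A.toNat + 1) * W2)
      ≤ (A + 1 - cs.getD k 0).toNat * ((A.toNat + 1) * W2) :=
    Nat.mul_le_mul_right _ hxy
  have hA1 : (A + 1 - (c + 1)).toNat = (A - c).toNat := by omega
  have hA2 : (A + 1 - 1).toNat = A.toNat := by omega
  rw [hA1] at e1
  rw [hA2] at e2
  have hgd : (cs.set k (c + 1)).getD (k + 1) 0 = cs.getD (k + 1) 0 := by
    simp [List.getD, List.getElem?_set_ne (by omega : k ≠ k + 1)]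
  rw [hgd] at e2
  have hexp : ((A - c).toNat + 1) * ((A.toNat + 1) * W2)
      = (A - c).toNat * ((A.toNat + 1) * W2) + A.toNat * W2 + W2 := by ring
  rw [hexp] at hmul
  nlinarith [e1, e2, hmul, hW2pos]

-- the simulation: B's iterative loop computes A's recursion unwound around the current level
lemma bLoop_eq (G : List (List Int)) (A : Int) (node₀ : Nat) (hA : 1 ≤ A)
    (hadj : adjOK G (node₀ : Int)) :
    ∀ (F : Nat) (i : Nat) (next sol : List Int),
      node₀ ≤ i → i < G.length → next.length = G.length →
      2 * phiSum A (next.drop node₀) + (i - node₀) + 1 ≤ F →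
      bLoop G (node₀ : Int) A F (i : Int) next sol
        = Unw G A node₀ next (i - node₀) (AloopI G A i (next.getD i 1) (sol.set i 0)) := by
  intro F
  induction F with
  | zero => intro i next sol _ _ _ hfuel; omega
  | succ F ih =>
    intro i next sol hni hin hlen hfuel
    have hadji := adjOK_level G (node₀ : Int) hadj i hin (by omega)
    -- name the scanned colour
    set cg := next.getD i 1 with hcg
    set c := bScan G sol (i : Int) A (A + 1 - cg).toNat cg with hc
    have hstep : bLoop G (node₀ : Int) A (F + 1) (i : Int) next sol
        = (if A < c then
            (if (i : Int) - 1 < (node₀ : Int) then (sol.set i 0, false)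
             else bLoop G (node₀ : Int) A F ((i : Int) - 1) next (sol.set i 0))
           else
            (if (i : Int) + 1 = (G.length : Int) then (sol.set i c, true)
             else bLoop G (node₀ : Int) A F ((i : Int) + 1)
               ((next.set i (c + 1)).set (i + 1) 1) (sol.set i c))) := by
      simp only [bLoop, PySem.List.pyGetD_natCast, PySem.List.pySetD_natCast, ← hcg, ← hc]
      congr 1
      have hcast : (i : Int) + 1 = ((i + 1 : Nat) : Int) := by omega
      rw [hcast, PySem.List.pySetD_natCast]
    -- the right-hand side, expanded by Aloop_eq
    have hrhs : AloopI G A i cg (sol.set i 0)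
        = (if c ≤ A then
            (let p := ccAux G A (G.length - i) (sol.set i c) ((i : Int) + 1);
             if p.2 then (p.1, true)
             else ccLoop G A (i : Int)
               (fun t => ccAux G A (G.length - i) t ((i : Int) + 1)) (A - c).toNat (c + 1)
               (p.1.set i 0))
           else (sol.set i 0, false)) := by
      unfold AloopI
      rw [Aloop_eq G A i _ hadji _ cg (sol.set i 0) rfl, bScan_set_zero G i sol A hadji, ← hc]
      simp only [List.set_set]
      by_cases hcA : c ≤ A
      · simp [hcA]
      · simp only [if_neg hcA]
        split_ifs <;> rfl
    rw [hstep]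
    by_cases hAc : A < c
    · -- colours exhausted at level i: retreat
      rw [if_pos hAc]
      have hrhs' : AloopI G A i cg (sol.set i 0) = (sol.set i 0, false) := by
        rw [hrhs, if_neg (by omega)]
      by_cases hbase : i = node₀
      · subst hbase
        rw [if_pos (by omega)]
        simp [hrhs', Unw]
      · rw [if_neg (by omega)]
        have hcast : (i : Int) - 1 = ((i - 1 : Nat) : Int) := by omega
        rw [hcast, ih (i - 1) next (sol.set i 0) (by omega) (by omega) hlen (by omega)]
        have hk : i - node₀ = (i - 1 - node₀) + 1 := by omega
        rw [hrhs', hk]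
        simp only [Unw, Bool.false_eq_true, if_false]
        have hlev : node₀ + (i - 1 - node₀) = i - 1 := by omega
        rw [hlev]
    · -- a colour found: advance
      rw [if_neg hAc]
      have hcA : c ≤ A := by omega
      by_cases hend : i + 1 = G.length
      · rw [if_pos (by omega)]
        have hp : ccAux G A (G.length - i) (sol.set i c) ((i : Int) + 1) = (sol.set i c, true) := by
          have hfi : G.length - i = 0 + 1 := by omega
          rw [hfi]
          simp only [ccAux]
          rw [if_pos (by omega)]
        rw [hrhs, if_pos hcA]
        simp only [hp]
        simp [Unw_true]
      · rw [if_neg (by omega)]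
        -- the recursive call of A at level i+1, as AloopI (i+1) 1
        have hp : ccAux G A (G.length - i) (sol.set i c) ((i : Int) + 1)
            = AloopI G A (i + 1) 1 ((sol.set i c).set (i + 1) 0) := by
          have hfi : G.length - i = (G.length - (i + 1)) + 1 := by omega
          rw [hfi]
          simp only [ccAux]
          rw [if_neg (by omega)]
          have hfuel1 : (A + 1 - 1).toNat = A.toNat := by omega
          have hadji1 := adjOK_level G (node₀ : Int) hadj (i + 1) (by omega) (by omega)
          have hcast : ((i + 1 : Nat) : Int) = (i : Int) + 1 := by omega
          rw [Aloop_zero G A (i + 1) 1 (sol.set i c) hA hadji1]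
          unfold AloopI
          rw [hfuel1, hcast]
        set next' := (next.set i (c + 1)).set (i + 1) 1 with hnext'
        have hcast1 : (i : Int) + 1 = ((i + 1 : Nat) : Int) := by omega
        have hgd1 : next'.getD (i + 1) 1 = 1 := by
          rw [hnext']
          simp [List.getD, (by omega : i + 1 < next.length)]
        have hgdi : next'.getD i 1 = c + 1 := by
          rw [hnext']
          simp [List.getD, (by omega : i < next.length)]
        -- fuel for the recursive application
        have hdropset : next'.drop node₀
            = ((next.drop node₀).set (i - node₀) (c + 1)).set (i - node₀ + 1) 1 := by
          rw [hnext']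
          rw [List.drop_set, List.drop_set]
          rw [if_neg (by omega), if_neg (by omega)]
          congr 2
          omega
        have hlendrop : (next.drop node₀).length = G.length - node₀ := by
          simp [hlen]
        have hgdk : (next.drop node₀).getD (i - node₀) 0 ≤ c := by
          have hge := bScan_ge G sol (i : Int) A (A + 1 - cg).toNat cg
          have : (next.drop node₀).getD (i - node₀) 0 = cg := by
            rw [hcg]
            have h1 : node₀ + (i - node₀) = i := by omega
            have hlt : i < next.length := by omega
            simp [List.getD, List.getElem?_drop, h1, List.getElem?_eq_getElem hlt]
          omega
        have hphi := phi_key A (next.drop node₀) (i - node₀) c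
          (by omega) hgdk hcA
        rw [← hdropset] at hphi
        rw [hcast1]
        rw [ih (i + 1) next' (sol.set i c) (by omega) (by omega) (by simp [hnext', hlen])
          (by omega)]
        have hk1 : i + 1 - node₀ = (i - node₀) + 1 := by omega
        rw [hk1, hgd1]
        simp only [Unw]
        have hlev : node₀ + (i - node₀) = i := by omega
        rw [hlev, hgdi]
        rw [hrhs, if_pos hcA]
        simp only [hp]
        -- both sides now unwind the same inner result through the same levels
        rcases hq : AloopI G A (i + 1) 1 ((sol.set i c).set (i + 1) 0) with ⟨qs, qb⟩
        cases qb with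
        | true =>
          simp [Unw_true]
        | false =>
          simp only [Bool.false_eq_true, if_false]
          have hAloopfix : ccLoop G A (i : Int)
              (fun t => ccAux G A (G.length - i) t ((i : Int) + 1)) (A - c).toNat (c + 1)
              (qs.set i 0) = AloopI G A i (c + 1) (qs.set i 0) := by
            unfold AloopI
            congr 1
            omega
          rw [hAloopfix]
          exact Unw_congr G A node₀ next' next (i - node₀) _
            (fun m hm => by
              rw [hnext']
              simp [List.getD, List.getElem?_set_ne (by omega : i + 1 ≠ node₀ + m),
                List.getElem?_set_ne (by omega : i ≠ node₀ + m)])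


-- ===== VERDICT (by name: the statement is the Claim_ definition above) =====
theorem coloring_count_spec : Claim_equal_coloring_count := by
  unfold Claim_equal_coloring_count Spec_coloring_count
  intro graph solution node color_amount _hdom hpre
  by_cases ha : color_amount < 1
  · -- no colours at all: A's while never runs, B fails (or succeeds trivially) at once
    unfold coloring_count coloring_count_alt
    by_cases hn : node = (graph.length : Int)
    · rw [if_pos hn]
      simp [ccAux, hn]
    · rw [if_neg hn, if_pos ha]
      simp only [ccAux, if_neg hn]
      rw [(by omega : color_amount.toNat = 0)]
      rfl
  · obtain ⟨hn0, hnle, hrest⟩ := hpre (by omega)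
    obtain ⟨i, rfl⟩ : ∃ i : Nat, node = (i : Int) := ⟨node.toNat, by omega⟩
    by_cases hn : (i : Int) = (graph.length : Int)
    · unfold coloring_count coloring_count_alt
      rw [Int.toNat_natCast, (by omega : i = graph.length), if_pos (by omega)]
      simp [ccAux]
    · have hlt : (i : Int) < (graph.length : Int) := lt_of_le_of_ne hnle hn
      obtain ⟨hlen, hadjok⟩ := hrest hlt
      have hadji := adjOK_level graph ((i : Nat) : Int) hadjok i (by omega) (by omega)
      -- A's side equals AloopI i 1 solution
      have hAside : coloring_count graph solution (i : Int) color_amount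
          = AloopI graph color_amount i 1 solution := by
        unfold coloring_count
        rw [Int.toNat_natCast]
        simp only [ccAux, if_neg hn]
        unfold AloopI
        rw [(by omega : (color_amount + 1 - 1).toNat = color_amount.toNat)]
      -- B's side
      have hBside : coloring_count_alt graph solution (i : Int) color_amount
          = AloopI graph color_amount i 1 (solution.set i 0) := by
        unfold coloring_count_alt
        rw [if_neg hn, if_neg ha, Int.toNat_natCast]
        rw [bLoop_eq graph color_amount i (by omega) hadjok _ i
          (List.replicate graph.length 1) solution (le_refl i) (by omega)
          (by simp)
          (by rw [List.drop_replicate]; omega)]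
        have hgd : (List.replicate graph.length 1).getD i (1 : Int) = 1 := by
          simp [List.getD, (by omega : i < graph.length)]
        rw [hgd, Nat.sub_self]
        rfl
      rw [hAside, hBside, Aloop_zero graph color_amount i 1 solution (by omega) hadji]
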